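-- pv_equiv track=rewrite | github.com/blakechasteen/hello-world | mythRL_core/summarization/summarizer.py | _count_sentences_for_words
-- ===== SOURCE A (Python) =====
-- from typing import List, Dict, Any, Optional
--
-- def _count_sentences_for_words(
--
--     scored_sentences: List[tuple],
--     max_words: int
-- ) -> int:
--     """Count how many sentences fit within word limit."""
--     total_words = 0
--     count = 0
--
--     for sentence, score, idx in scored_sentences:
--         sentence_words = len(sentence.split())
--         if total_words + sentence_words <= max_words:
--             total_words += sentence_words
--             count += 1
--         else:
--             break
--
--     return max(1, count)  # At least 1 sentence
-- ===== SOURCE B (Python) =====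
-- import bisect
-- from itertools import accumulate
--
-- def _count_sentences_for_words(scored_sentences, max_words):
--     counts = [len(sentence.split()) for sentence, score, idx in scored_sentences]
--     prefix = list(accumulate(counts))
--     # word counts are non-negative, so prefix is non-decreasing: the number of
--     # prefix sums <= max_words equals A's early-break count
--     return max(1, bisect.bisect_right(prefix, max_words))
-- ===== Notes on version B (the rewrite author's own statement) =====
-- stated objective: alternative
-- what changed: Replaces the accumulate-and-break loop by building the list of prefix word-count sums with itertools.accumulate and locating the budget with bisect_right (binary search), valid because word counts are non-negative so prefix sums are monotone.
import Mathlib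
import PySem

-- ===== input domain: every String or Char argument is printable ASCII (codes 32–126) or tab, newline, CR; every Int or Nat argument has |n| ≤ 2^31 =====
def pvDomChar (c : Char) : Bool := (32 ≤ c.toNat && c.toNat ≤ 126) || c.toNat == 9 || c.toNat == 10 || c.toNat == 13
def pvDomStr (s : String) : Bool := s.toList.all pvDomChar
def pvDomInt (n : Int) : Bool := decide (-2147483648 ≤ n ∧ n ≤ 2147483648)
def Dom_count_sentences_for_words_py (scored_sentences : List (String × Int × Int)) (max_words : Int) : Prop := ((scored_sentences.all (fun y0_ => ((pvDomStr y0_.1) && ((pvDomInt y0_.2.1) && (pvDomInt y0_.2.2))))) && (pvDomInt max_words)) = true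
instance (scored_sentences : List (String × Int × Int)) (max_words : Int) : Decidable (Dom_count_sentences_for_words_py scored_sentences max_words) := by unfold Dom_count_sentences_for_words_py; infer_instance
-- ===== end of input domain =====

-- B replaces A's accumulate-and-break loop by prefix word-count sums + bisect_right (binary search);
-- equivalent because word counts are non-negative, so the prefix sums are non-decreasing.


-- ===== PORT A =====
-- A's loop: accumulate word counts, break at the first sentence that does not fit
def cswLoopA (max_words : Int) : List (String × Int × Int) → Int → Int → Int
  | [], _, count => max 1 count
  | (sentence, _, _) :: rest, total_words, count =>
    let sentence_words : Int := ((PySem.Str.split₀ sentence).length : Int)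
    if total_words + sentence_words ≤ max_words then
      cswLoopA max_words rest (total_words + sentence_words) (count + 1)
    else
      max 1 count

def count_sentences_for_words_py (scored_sentences : List (String × Int × Int)) (max_words : Int) : Int :=
  cswLoopA max_words scored_sentences 0 0

-- ===== PORT B =====
-- body of B's comprehension: len(sentence.split()) for one (sentence, score, idx) tuple
def cswWc (p : String × Int × Int) : Int := ((PySem.Str.split₀ p.1).length : Int)

-- itertools.accumulate on the word counts (running sum)
def cswAccumulate : List Int → Int → List Int
  | [], _ => []
  | c :: rest, run => (run + c) :: cswAccumulate rest (run + c)

-- bisect.bisect_right ported literally as the binary search it performs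
-- (fuel = hi - lo makes the while-loop structural; it never runs out, see cswBisectGo_spec)
def cswBisectGo : Nat → List Int → Int → Nat → Nat → Nat
  | 0, _, _, lo, _ => lo
  | fuel + 1, a, x, lo, hi =>
    if lo < hi then
      let mid := (lo + hi) / 2
      if x < a.getD mid 0 then cswBisectGo fuel a x lo mid
      else cswBisectGo fuel a x (mid + 1) hi
    else lo

def cswBisectRight (a : List Int) (x : Int) (lo hi : Nat) : Nat :=
  cswBisectGo (hi - lo) a x lo hi

def count_sentences_for_words_py_alt (scored_sentences : List (String × Int × Int)) (max_words : Int) : Int :=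
  let counts := scored_sentences.map cswWc
  let prefixSums := cswAccumulate counts 0
  max 1 ((cswBisectRight prefixSums max_words 0 prefixSums.length : Nat) : Int)

-- ===== PRECONDITION & SPEC =====
def Spec_count_sentences_for_words_py (scored_sentences : List (String × Int × Int)) (max_words : Int) (out : Int) : Prop := out = count_sentences_for_words_py_alt scored_sentences max_words
instance (scored_sentences : List (String × Int × Int)) (max_words : Int) (out : Int) : Decidable (Spec_count_sentences_for_words_py scored_sentences max_words out) := by unfold Spec_count_sentences_for_words_py; infer_instance

-- ===== CLAIM (what is proved, stated in full; the proofs are below) =====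
def Claim_equal_count_sentences_for_words_py : Prop := ∀ (scored_sentences : List (String × Int × Int)) (max_words : Int), Dom_count_sentences_for_words_py scored_sentences max_words → Spec_count_sentences_for_words_py scored_sentences max_words (count_sentences_for_words_py scored_sentences max_words)

-- ===== LEMMAS AND PROOFS =====

-- number of sentences A takes, as a Nat, starting from running total `total`
def cswTake (max_words : Int) : List (String × Int × Int) → Int → Nat
  | [], _ => 0
  | p :: rest, total =>
    if total + cswWc p ≤ max_words then 1 + cswTake max_words rest (total + cswWc p) else 0

theorem cswWc_nonneg (p : String × Int × Int) : 0 ≤ cswWc p := by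
  simp [cswWc]

theorem cswLoopA_eq (x : Int) (l : List (String × Int × Int)) (total c : Int) :
    cswLoopA x l total c = max 1 (c + (cswTake x l total : Int)) := by
  induction l generalizing total c with
  | nil => simp [cswLoopA, cswTake]
  | cons p rest ih =>
    obtain ⟨s, a, b⟩ := p
    simp only [cswLoopA, cswTake, cswWc]
    split_ifs with h
    · rw [ih]; push_cast; ring_nf
    · simp

-- invariant-based correctness of the binary search: any k bracketed by lo/hi with
-- everything below k ≤ x and everything from k on > x is the result
theorem cswBisectGo_spec (fuel : Nat) (a : List Int) (x : Int) (lo hi k : Nat)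
    (hfuel : hi - lo ≤ fuel)
    (hlo : lo ≤ k) (hk : k ≤ hi) (hhi : hi ≤ a.length)
    (hbelow : ∀ i < k, a.getD i 0 ≤ x)
    (habove : ∀ i, k ≤ i → i < a.length → x < a.getD i 0) :
    cswBisectGo fuel a x lo hi = k := by
  induction fuel generalizing lo hi with
  | zero => simp only [cswBisectGo]; omega
  | succ fuel ih =>
    simp only [cswBisectGo]
    split_ifs with h hm
    · have hkm : k ≤ (lo + hi) / 2 := by
        by_contra hc
        have := hbelow ((lo + hi) / 2) (by omega)
        omega
      exact ih lo ((lo+hi)/2) (by omega) hlo hkm (by omega)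
    · have hmk : (lo + hi) / 2 + 1 ≤ k := by
        by_contra hc
        have := habove ((lo + hi) / 2) (by omega) (by omega)
        omega
      exact ih ((lo+hi)/2+1) hi (by omega) hmk hk hhi
    · omega

theorem cswBisectRight_spec (a : List Int) (x : Int) (lo hi k : Nat)
    (hlo : lo ≤ k) (hk : k ≤ hi) (hhi : hi ≤ a.length)
    (hbelow : ∀ i < k, a.getD i 0 ≤ x)
    (habove : ∀ i, k ≤ i → i < a.length → x < a.getD i 0) :
    cswBisectRight a x lo hi = k :=
  cswBisectGo_spec (hi - lo) a x lo hi k (Nat.le_refl _) hlo hk hhi hbelow habove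

theorem cswAccumulate_length (cs : List Int) (b : Int) :
    (cswAccumulate cs b).length = cs.length := by
  induction cs generalizing b with
  | nil => simp [cswAccumulate]
  | cons c rest ih => simp [cswAccumulate, ih]

-- every entry of an accumulate of non-negative counts is at least the start value
theorem cswAccumulate_lb (cs : List Int) (b : Int) (hnn : ∀ c ∈ cs, 0 ≤ c) :
    ∀ y ∈ cswAccumulate cs b, b ≤ y := by
  induction cs generalizing b with
  | nil => simp [cswAccumulate]
  | cons c rest ih =>
    intro y hy
    have hc : 0 ≤ c := hnn c (by simp)
    simp only [cswAccumulate, List.mem_cons] at hy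
    rcases hy with rfl | hy
    · omega
    · have := ih (b + c) (fun d hd => hnn d (by simp [hd])) y hy
      omega

-- cswTake is the index below which prefix sums stay ≤ x …
theorem cswTake_below (x : Int) (l : List (String × Int × Int)) (b : Int) :
    ∀ i < cswTake x l b, (cswAccumulate (l.map cswWc) b).getD i 0 ≤ x := by
  induction l generalizing b with
  | nil => simp [cswTake]
  | cons p rest ih =>
    intro i hi
    simp only [cswTake] at hi
    by_cases h : b + cswWc p ≤ x
    · simp only [h, if_true] at hi
      simp only [List.map_cons, cswAccumulate]
      cases i with
      | zero => simpa using h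
      | succ j => exact ih (b + cswWc p) j (by omega)
    · simp [h] at hi

-- … and from which on they exceed x
theorem cswTake_above (x : Int) (l : List (String × Int × Int)) (b : Int) :
    ∀ i, cswTake x l b ≤ i → i < (cswAccumulate (l.map cswWc) b).length →
      x < (cswAccumulate (l.map cswWc) b).getD i 0 := by
  induction l generalizing b with
  | nil => simp [cswAccumulate]
  | cons p rest ih =>
    intro i hki hlen
    simp only [List.map_cons, cswAccumulate, List.length_cons] at hlen ⊢
    by_cases h : b + cswWc p ≤ x
    · simp only [cswTake, h, if_true] at hki
      cases i with
      | zero => omega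
      | succ j => exact ih (b + cswWc p) j (by omega) (by omega)
    · rw [not_le] at h
      cases i with
      | zero => simpa using h
      | succ j =>
        have hr : (cswAccumulate (rest.map cswWc) (b + cswWc p)).length = rest.length := by
          rw [cswAccumulate_length, List.length_map]
        have hmem : (cswAccumulate (rest.map cswWc) (b + cswWc p)).getD j 0
            ∈ cswAccumulate (rest.map cswWc) (b + cswWc p) := by
          rw [List.getD_eq_getElem _ _ (by omega)]
          exact List.getElem_mem _
        have := cswAccumulate_lb (rest.map cswWc) (b + cswWc p) (by
          intro c hc
          simp only [List.mem_map] at hc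
          obtain ⟨q, _, rfl⟩ := hc
          exact cswWc_nonneg q) _ hmem
        simp only [List.getD_cons_succ]
        omega

theorem cswTake_le_length (x : Int) (l : List (String × Int × Int)) (b : Int) :
    cswTake x l b ≤ l.length := by
  induction l generalizing b with
  | nil => simp [cswTake]
  | cons p rest ih =>
    simp only [cswTake, List.length_cons]
    split_ifs with h
    · have := ih (b + cswWc p); omega
    · omega

theorem csw_alt_eq (ss : List (String × Int × Int)) (x : Int) :
    count_sentences_for_words_py_alt ss x = max 1 ((cswTake x ss 0 : Nat) : Int) := by
  have hlen : cswTake x ss 0 ≤ (cswAccumulate (ss.map cswWc) 0).length := by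
    rw [cswAccumulate_length, List.length_map]
    exact cswTake_le_length x ss 0
  have hb := cswBisectRight_spec (cswAccumulate (ss.map cswWc) 0) x
    0 (cswAccumulate (ss.map cswWc) 0).length (cswTake x ss 0)
    (Nat.zero_le _) hlen (Nat.le_refl _)
    (cswTake_below x ss 0)
    (cswTake_above x ss 0)
  show max 1 ((cswBisectRight (cswAccumulate (ss.map cswWc) 0) x 0
      (cswAccumulate (ss.map cswWc) 0).length : Nat) : Int) = max 1 ((cswTake x ss 0 : Nat) : Int)
  rw [hb]

-- ===== VERDICT (by name: the statement is the Claim_ definition above) =====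
theorem count_sentences_for_words_py_spec : Claim_equal_count_sentences_for_words_py := by
  intro ss x _
  unfold Spec_count_sentences_for_words_py count_sentences_for_words_py
  rw [cswLoopA_eq, csw_alt_eq]
  omega
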